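-- pv_equiv track=rewrite | github.com/hectwilliams/AlgorithmBook | chapter18/python/chap_18.py | encode_bytes_to_32
-- ===== SOURCE A (Python) =====
-- def encode_bytes_to_32 (array):
--     result = 0
--     byte_size = 8
--
--     for i in range(len(array)):
--         value = array[i]
--         byte_index = len(array) - 1  - i
--         result  =  result | (value <<  byte_index * byte_size )  # | (or)
--     return result
-- ===== SOURCE B (Python) =====
-- def encode_bytes_to_32(array):
--     result = 0
--     for value in array:
--         result = (result << 8) | value
--     return result
-- ===== Notes on version B (the rewrite author's own statement) =====
-- stated objective: simpler
-- what changed: Replaces the positional-index OR (each element shifted by (len(array)-1-i)*8 bits and ORed into place) with a Horner-style forward pass that shifts the running accumulator left by a constant 8 bits and ORs in each value, dropping the index and shift-distance arithmetic.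
import Mathlib
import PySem

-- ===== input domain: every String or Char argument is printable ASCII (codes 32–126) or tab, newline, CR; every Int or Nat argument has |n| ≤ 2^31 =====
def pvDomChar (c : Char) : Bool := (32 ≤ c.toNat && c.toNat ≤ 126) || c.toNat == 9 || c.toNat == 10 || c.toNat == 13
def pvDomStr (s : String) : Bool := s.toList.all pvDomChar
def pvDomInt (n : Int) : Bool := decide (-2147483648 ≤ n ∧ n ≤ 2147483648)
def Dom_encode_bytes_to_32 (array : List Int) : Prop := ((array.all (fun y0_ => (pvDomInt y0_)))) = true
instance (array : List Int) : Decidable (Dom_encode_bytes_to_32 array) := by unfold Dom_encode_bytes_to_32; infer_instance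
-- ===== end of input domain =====

-- B replaces A's positional-index OR (shift computed from len(array)-1-i) with a
-- Horner-style forward pass (result = (result << 8) | value); same return value, objective: simpler.


-- ===== PORT A =====
-- 'value << byte_index * byte_size': byte_index = len-1-i ≥ 0 for every i in range(len),
-- so '.toNat' on the shift count is exact (Python raises only on a NEGATIVE shift count).
def encode_bytes_to_32 (array : List Int) : Int :=
  (PySem.List.pyRange 0 (PySem.List.len array) 1).foldl
    (fun result i =>
      let value := PySem.List.pyGetD array i 0
      let byte_index : Int := PySem.List.len array - 1 - i
      PySem.Int.bor result (value <<< (byte_index * 8).toNat)) 0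

-- ===== PORT B =====
def encode_bytes_to_32_alt (array : List Int) : Int :=
  array.foldl (fun result value => PySem.Int.bor (result <<< (8 : Nat)) value) 0

-- ===== PRECONDITION & SPEC =====
def Spec_encode_bytes_to_32 (array : List Int) (out : Int) : Prop := out = encode_bytes_to_32_alt array
instance (array : List Int) (out : Int) : Decidable (Spec_encode_bytes_to_32 array out) := by unfold Spec_encode_bytes_to_32; infer_instance

-- ===== CLAIM (what is proved, stated in full; the proofs are below) =====
def Claim_equal_encode_bytes_to_32 : Prop := ∀ (array : List Int), Dom_encode_bytes_to_32 array → Spec_encode_bytes_to_32 array (encode_bytes_to_32 array)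

-- ===== LEMMAS AND PROOFS =====

-- bit-partition fact: (n &&& m) and (n &&& ¬m) split n
theorem land_add_ldiff (n m : Nat) : (n &&& m) + Nat.ldiff n m = n := by
  induction n using Nat.binaryRec generalizing m with
  | zero => simp [Nat.ldiff]
  | bit a n ih =>
    rw [← m.bit_testBit_zero_shiftRight_one, Nat.land_bit, Nat.ldiff_bit]
    have h := ih (m >>> 1)
    simp only [Nat.bit]
    cases a <;> cases m.testBit 0 <;> simp <;> omega

theorem bor_eq_lor (a b : Int) : PySem.Int.bor a b = Int.lor a b := by
  unfold PySem.Int.bor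
  rcases a with m | m <;> rcases b with n | n <;>
    simp [Int.lor, Int.negSucc_eq] <;>
  · have h1 := land_add_ldiff n m
    have h2 := land_add_ldiff m n
    have h3 := Nat.land_comm n m
    omega

theorem lor_two_mul (a b : Int) : Int.lor (2*a) (2*b) = 2 * Int.lor a b := by
  simpa [Int.bit] using Int.lor_bit false a false b

theorem lor_shl (a b : Int) (m : Nat) :
    (Int.lor a b) <<< m = Int.lor (a <<< m) (b <<< m) := by
  induction m with
  | zero => simp [Int.shiftLeft_eq]
  | succ k ih =>
    simp only [Int.shiftLeft_eq, pow_succ] at *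
    calc a.lor b * (2^k * 2) = 2 * (a.lor b * 2^k) := by ring
    _ = 2 * ((a*2^k).lor (b*2^k)) := by rw [ih]
    _ = (2*(a*2^k)).lor (2*(b*2^k)) := (lor_two_mul _ _).symm
    _ = (a * (2^k*2)).lor (b*(2^k*2)) := by ring_nf

theorem int_testBit_ext {a b : Int} (h : ∀ k, a.testBit k = b.testBit k) : a = b := by
  rcases a with m | m <;> rcases b with n | n
  · exact congrArg Int.ofNat (Nat.eq_of_testBit_eq fun k => h k)
  · have hk := h (m + n)
    have h1 : m.testBit (m+n) = false := Nat.testBit_eq_false_of_lt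
      (lt_of_lt_of_le Nat.lt_two_pow_self (Nat.pow_le_pow_right (by norm_num) (by omega)))
    have h2 : n.testBit (m+n) = false := Nat.testBit_eq_false_of_lt
      (lt_of_lt_of_le Nat.lt_two_pow_self (Nat.pow_le_pow_right (by norm_num) (by omega)))
    simp [Int.testBit, h1, h2] at hk
  · have hk := h (m + n)
    have h1 : m.testBit (m+n) = false := Nat.testBit_eq_false_of_lt
      (lt_of_lt_of_le Nat.lt_two_pow_self (Nat.pow_le_pow_right (by norm_num) (by omega)))
    have h2 : n.testBit (m+n) = false := Nat.testBit_eq_false_of_lt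
      (lt_of_lt_of_le Nat.lt_two_pow_self (Nat.pow_le_pow_right (by norm_num) (by omega)))
    simp [Int.testBit, h1, h2] at hk
  · exact congrArg Int.negSucc (Nat.eq_of_testBit_eq fun k => by
      have := h k; simpa [Int.testBit] using this)

theorem lor_assoc (a b c : Int) : Int.lor (Int.lor a b) c = Int.lor a (Int.lor b c) := by
  apply int_testBit_ext
  intro k
  simp [Int.testBit_lor, Bool.or_assoc]

theorem pybor_assoc (a b c : Int) :
    PySem.Int.bor (PySem.Int.bor a b) c = PySem.Int.bor a (PySem.Int.bor b c) := by
  simp [bor_eq_lor, lor_assoc]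

theorem pybor_shl (a b : Int) (m : Nat) :
    (PySem.Int.bor a b) <<< m = PySem.Int.bor (a <<< m) (b <<< m) := by
  simp [bor_eq_lor, lor_shl]

theorem zero_pybor (a : Int) : PySem.Int.bor 0 a = a := by
  rw [PySem.Int.bor_comm]; exact PySem.Int.bor_zero a

-- common spec: the OR of each element shifted to its positional slot
def pvSpread : List Int → Int
  | [] => 0
  | v :: t => PySem.Int.bor (v <<< (8 * t.length)) (pvSpread t)

theorem alt_eq_spread_aux (xs : List Int) (acc : Int) :
    xs.foldl (fun result value => PySem.Int.bor (result <<< (8 : Nat)) value) acc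
      = PySem.Int.bor (acc <<< (8 * xs.length)) (pvSpread xs) := by
  induction xs generalizing acc with
  | nil => simp [pvSpread, Int.shiftLeft_eq]
  | cons v t ih =>
    simp only [List.foldl_cons, ih, pvSpread, pybor_shl, pybor_assoc,
      List.length_cons]
    rw [← Int.shiftLeft_add]
    congr 2
    omega

theorem alt_eq_spread (xs : List Int) : encode_bytes_to_32_alt xs = pvSpread xs := by
  unfold encode_bytes_to_32_alt
  rw [alt_eq_spread_aux, Int.shiftLeft_eq]
  simp [zero_pybor]

theorem a_loop_eq_spread (xs : List Int) : ∀ (pre : List Int) (acc : Int),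
    (PySem.List.pyRange pre.length (pre.length + xs.length) 1).foldl
      (fun result i =>
        PySem.Int.bor result
          ((PySem.List.pyGetD (pre ++ xs) i 0)
            <<< (((PySem.List.len (pre ++ xs)) - 1 - i) * 8).toNat)) acc
      = PySem.Int.bor acc (pvSpread xs) := by
  induction xs with
  | nil =>
    intro pre acc
    rw [PySem.List.pyRange_one_eq_nil (by simp)]
    simp [pvSpread]
  | cons v t ih =>
    intro pre acc
    rw [PySem.List.pyRange_one_cons (by push_cast [List.length_cons]; omega)]
    simp only [List.foldl_cons]
    have hget : PySem.List.pyGetD (pre ++ v :: t) (pre.length : Int) 0 = v := by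
      simp [PySem.List.pyGetD]
    have hlen : PySem.List.len (pre ++ v :: t) = (pre.length : Int) + t.length + 1 := by
      simp [PySem.List.len_eq]; ring
    have hsh : ((PySem.List.len (pre ++ v :: t) - 1 - (pre.length : Int)) * 8).toNat
        = 8 * t.length := by
      rw [hlen]; omega
    rw [hget, hsh]
    have := ih (pre ++ [v]) (PySem.Int.bor acc (v <<< (8 * t.length)))
    simp only [List.append_assoc, List.singleton_append, List.length_append,
      List.length_singleton] at this
    push_cast [List.length_cons] at this ⊢
    ring_nf at this ⊢
    rw [this]
    simp [pvSpread, pybor_assoc, Nat.mul_comm]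

theorem a_eq_spread (xs : List Int) : encode_bytes_to_32 xs = pvSpread xs := by
  have h := a_loop_eq_spread xs [] 0
  simp only [List.length_nil, List.nil_append, Nat.cast_zero, zero_add] at h
  have h2 : encode_bytes_to_32 xs = PySem.Int.bor 0 (pvSpread xs) := h
  rw [h2, zero_pybor]

-- ===== VERDICT (by name: the statement is the Claim_ definition above) =====
theorem encode_bytes_to_32_spec : Claim_equal_encode_bytes_to_32 := by
  intro array _
  unfold Spec_encode_bytes_to_32
  rw [a_eq_spread, alt_eq_spread]
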